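-- pv_equiv track=rewrite | github.com/David-5-5/tutorial | python/algo/202408/leetcode2411.py | smallestSubarrays3
-- ===== SOURCE A (Python) =====
-- from typing import List
--
-- def smallestSubarrays3(nums: List[int]) -> List[int]:
--     # 参考题解， 方法一
--     ans = [1] * len(nums)
--
--     for i, v in enumerate(nums):
--         for j in range(i-1, -1, -1):
--             if nums[j] | v == nums[j]:
--                 break
--             nums[j] |= v
--             ans[j] = i -j + 1
--     return ans
-- ===== SOURCE B (Python) =====
-- def smallestSubarrays3(nums):
--     # For each bit (0..31 plus the sign bit at position 32, enough for |v| <= 2**31),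
--     # track the nearest index >= i where that bit is set while scanning right-to-left;
--     # the answer at i is the farthest such nearest index, minus i, plus 1.
--     n = len(nums)
--     last = [-1] * 33
--     ans = []
--     for i in range(n - 1, -1, -1):
--         x = nums[i]
--         for b in range(33):
--             if (x >> b) & 1:
--                 last[b] = i
--         k = i
--         for p in last:
--             if p > k:
--                 k = p
--         ans.append(k - i + 1)
--     ans.reverse()
--     return ans
-- ===== Notes on version B (the rewrite author's own statement) =====
-- stated objective: alternative
-- what changed: Replaces A's in-place leftward OR-propagation with early break (which mutates nums) by a single right-to-left scan that tracks, for each of the 33 relevant bit positions (bits 0-31 plus the sign bit, enough for |v| <= 2**31), the nearest index where that bit is set; ans[i] is the farthest of those nearest indices minus i plus 1, and nums is not mutated.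
import Mathlib
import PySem

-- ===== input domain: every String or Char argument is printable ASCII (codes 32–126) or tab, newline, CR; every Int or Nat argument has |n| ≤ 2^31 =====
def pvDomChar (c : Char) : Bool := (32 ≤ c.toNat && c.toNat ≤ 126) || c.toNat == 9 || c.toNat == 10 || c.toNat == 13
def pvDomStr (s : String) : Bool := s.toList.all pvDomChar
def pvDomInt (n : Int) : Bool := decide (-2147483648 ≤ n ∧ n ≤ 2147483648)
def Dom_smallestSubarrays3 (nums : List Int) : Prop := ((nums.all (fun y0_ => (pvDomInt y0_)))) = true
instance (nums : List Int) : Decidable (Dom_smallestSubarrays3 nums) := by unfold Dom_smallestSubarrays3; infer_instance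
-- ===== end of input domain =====

-- B replaces A's in-place leftward OR-propagation (A mutates its argument; the equivalence
-- proved here is about the return value only) by a right-to-left scan tracking, per bit
-- position 0..32, the nearest index where that bit is set — a different algorithm, same cost class.


-- ===== PORT A =====
-- inner loop `for j in range(i-1, -1, -1)` with its break, descending over j (fuel = j+1)
def pA_inner (v : Int) (i : Nat) : Nat → List Int × List Int → List Int × List Int
  | 0, st => st
  | j+1, (ns, ans) =>
    let nj := ns.getD j 0
    if PySem.Int.bor nj v = nj then (ns, ans)
    else pA_inner v i j (ns.set j (PySem.Int.bor nj v), ans.set j ((i : Int) - (j : Nat) + 1))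

def smallestSubarrays3 (nums : List Int) : List Int :=
  ((List.range nums.length).foldl (fun st i => pA_inner (st.1.getD i 0) i i st)
    (nums, List.replicate nums.length 1)).2

-- ===== PORT B =====
-- `for b in range(33): if (x >> b) & 1: last[b] = i`
def pB_setBits (x : Int) (i : Nat) (last : List Int) : List Int :=
  (List.range 33).foldl (fun l b => if PySem.Int.band (Int.shiftRight x b) 1 = 1 then l.set b (i : Int) else l) last

-- `k = i; for p in last: if p > k: k = p`
def pB_maxOf (i : Nat) (last : List Int) : Int :=
  last.foldl (fun k p => if p > k then p else k) (i : Int)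

-- `for i in range(n-1, -1, -1)`; acc plays the role of ans built back-to-front (append + final reverse)
def pB_loop (nums : List Int) : Nat → List Int → List Int → List Int
  | 0, _, acc => acc
  | i+1, last, acc =>
    let last' := pB_setBits (nums.getD i 0) i last
    pB_loop nums i last' ((pB_maxOf i last' - (i : Nat) + 1) :: acc)

def smallestSubarrays3_alt (nums : List Int) : List Int :=
  pB_loop nums nums.length (List.replicate 33 (-1)) []

-- ===== PRECONDITION & SPEC =====
def Spec_smallestSubarrays3 (nums : List Int) (out : List Int) : Prop := out = smallestSubarrays3_alt nums
instance (nums : List Int) (out : List Int) : Decidable (Spec_smallestSubarrays3 nums out) := by unfold Spec_smallestSubarrays3; infer_instance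

-- ===== CLAIM (what is proved, stated in full; the proofs are below) =====
def Claim_equal_smallestSubarrays3 : Prop := ∀ (nums : List Int), Dom_smallestSubarrays3 nums → Spec_smallestSubarrays3 nums (smallestSubarrays3 nums)

-- ===== LEMMAS AND PROOFS =====

-- ---- bit-level toolbox ----
theorem pv_natF (a b : Nat) : Nat.ldiff a b + (a &&& b) = a := by
  induction a using Nat.binaryRec generalizing b with
  | zero => simp [Nat.ldiff]
  | bit a0 a' IH =>
    induction b using Nat.binaryRec with
    | zero => simp [Nat.ldiff]
    | bit b0 b' _ =>
      rw [Nat.ldiff_bit, Nat.land_bit, Nat.bit_val, Nat.bit_val, Nat.bit_val]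
      have := IH b'
      cases a0 <;> cases b0 <;> simp <;> omega

theorem pv_bor_eq_lor (a b : Int) : PySem.Int.bor a b = Int.lor a b := by
  have hF : ∀ m n : Nat, n - (n &&& m) = Nat.ldiff n m := by
    intro m n; have := pv_natF n m; omega
  have hno : ∀ n : Nat, ¬ (0 : Int) ≤ Int.negSucc n := fun n => of_decide_eq_false rfl
  have hyes : ∀ n : Nat, (0 : Int) ≤ Int.ofNat n := fun n => Int.natCast_nonneg n
  have htn : ∀ n : Nat, (-Int.negSucc n - 1).toNat = n := by
    intro n; simp [Int.negSucc_eq]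
  unfold PySem.Int.bor
  cases a with
  | ofNat m =>
    cases b with
    | ofNat n => simp [Int.lor]
    | negSucc n =>
      simp only [hyes, hno, if_true, if_false, Int.lor, htn]
      rw [hF]
      simp [Int.negSucc_eq]
      omega
  | negSucc m =>
    cases b with
    | ofNat n =>
      simp only [hyes, hno, if_true, if_false, Int.lor, htn]
      rw [hF]
      simp [Int.negSucc_eq]
      omega
    | negSucc n =>
      simp only [hno, if_false, Int.lor, htn]
      simp [Int.negSucc_eq]
      omega

theorem pv_testBit_bor (x y : Int) (b : Nat) :
    (PySem.Int.bor x y).testBit b = (x.testBit b || y.testBit b) := by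
  rw [pv_bor_eq_lor]; exact Int.testBit_lor x y b

theorem pv_intExt (x y : Int) (h : ∀ b, x.testBit b = y.testBit b) : x = y := by
  have key : ∀ m n : Nat, (∀ b, (Int.ofNat m).testBit b = (Int.negSucc n).testBit b) → False := by
    intro m n hmn
    have hb : m < 2 ^ (m + n) := lt_of_le_of_lt (Nat.le_add_right m n) (Nat.lt_two_pow_self)
    have hb' : n < 2 ^ (m + n) := lt_of_le_of_lt (Nat.le_add_left n m) (Nat.lt_two_pow_self)
    have h1 := hmn (m + n)
    simp [Int.testBit, Nat.testBit_lt_two_pow hb, Nat.testBit_lt_two_pow hb'] at h1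
  cases x with
  | ofNat m =>
    cases y with
    | ofNat n =>
      congr 1
      exact Nat.eq_of_testBit_eq (fun b => by simpa [Int.testBit] using h b)
    | negSucc n => exact absurd h (fun hh => key m n hh)
  | negSucc m =>
    cases y with
    | ofNat n => exact absurd (fun b => (h b).symm) (fun hh => key n m hh)
    | negSucc n =>
      congr 1
      refine Nat.eq_of_testBit_eq (fun b => ?_)
      have := h b
      simpa [Int.testBit] using this

theorem pv_testBit_zero_int (b : Nat) : (0 : Int).testBit b = false := by
  simp [Int.testBit]

-- Python's `(x >> b) & 1 == 1` is exactly testBit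
theorem pv_bitSel (x : Int) (b : Nat) :
    (PySem.Int.band (Int.shiftRight x b) 1 = 1) ↔ x.testBit b = true := by
  cases x with
  | ofNat m =>
    show PySem.Int.band (Int.ofNat (m >>> b)) 1 = 1 ↔ _
    have h0 : PySem.Int.band (Int.ofNat (m >>> b)) 1 = ((m >>> b) &&& 1 : Nat) := by
      exact_mod_cast PySem.Int.band_natCast (m >>> b) 1
    rw [h0, show (((m >>> b) &&& 1 : Nat) : Int) = 1 ↔ ((m >>> b) &&& 1 : Nat) = 1 from by exact_mod_cast Iff.rfl]
    simp [Int.testBit, Nat.testBit, Nat.and_one_is_mod, Nat.one_and_eq_mod_two]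
  | negSucc m =>
    show PySem.Int.band (Int.negSucc (m >>> b)) 1 = 1 ↔ _
    have hno : ¬ (0 : Int) ≤ Int.negSucc (m >>> b) := of_decide_eq_false rfl
    unfold PySem.Int.band
    rw [if_neg hno, if_pos (by norm_num)]
    have h1 : (-Int.negSucc (m >>> b) - 1).toNat = m >>> b := by
      rw [Int.negSucc_eq]; omega
    rw [h1]
    rw [show (((1 : Int).toNat - ((1 : Int).toNat &&& (m >>> b)) : Nat) : Int) = 1
          ↔ ((1 : Nat) - (1 &&& (m >>> b))) = 1 from by exact_mod_cast Iff.rfl]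
    simp [Int.testBit, Nat.testBit, Nat.one_and_eq_mod_two]
    omega

-- `y | x == y` means the bits of x are among the bits of y
theorem pv_bor_eq_iff (x y : Int) :
    PySem.Int.bor y x = y ↔ (∀ b, x.testBit b = true → y.testBit b = true) := by
  constructor
  · intro h b hb
    have h2 := pv_testBit_bor y x b
    rw [h, hb] at h2
    simp at h2
    exact h2
  · intro h
    apply pv_intExt
    intro b
    rw [pv_testBit_bor]
    cases hx : x.testBit b with
    | false => simp
    | true => simp [h b hx]

-- |x| ≤ 2^31 ⇒ every bit from position 32 up equals bit 32 (sign extension)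
theorem pv_dom_testBit_high (x : Int) (hx : pvDomInt x = true) (b : Nat) (hb : 32 ≤ b) :
    x.testBit b = x.testBit 32 := by
  have hx' := of_decide_eq_true hx
  have hpow : (2 : Nat) ^ 32 ≤ 2 ^ b := Nat.pow_le_pow_right (by norm_num) hb
  cases x with
  | ofNat m =>
    have hm : m < 2 ^ 32 := by
      have h2 : (m : Int) ≤ 2147483648 := hx'.2
      have h3 : (2 : Nat) ^ 32 = 4294967296 := by norm_num
      omega
    simp [Int.testBit, Nat.testBit_lt_two_pow hm, Nat.testBit_lt_two_pow (lt_of_lt_of_le hm hpow)]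
  | negSucc m =>
    have hm : m < 2 ^ 32 := by
      have h2 : (-2147483648 : Int) ≤ Int.negSucc m := hx'.1
      rw [Int.negSucc_eq] at h2
      have h3 : (2 : Nat) ^ 32 = 4294967296 := by norm_num
      omega
    simp [Int.testBit, Nat.testBit_lt_two_pow hm, Nat.testBit_lt_two_pow (lt_of_lt_of_le hm hpow)]


-- ---- generic list / fold helpers ----
theorem pv_getD_map_range (n j : Nat) (f : Nat → Int) (hj : j < n) :
    ((List.range n).map f).getD j 0 = f j := by
  rw [List.getD_eq_getElem?_getD]
  simp [hj]

theorem pv_set_map_range (n j : Nat) (f : Nat → Int) (x : Int) :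
    (((List.range n).map f).set j x) = (List.range n).map (fun t => if t = j then x else f t) := by
  apply List.ext_getElem
  · simp
  · intro k h1 h2
    simp only [List.getElem_set, List.getElem_map, List.getElem_range]
    simp at h1
    by_cases hk : j = k
    · subst hk; simp
    · simp [hk, Ne.symm hk]

theorem pv_fm_init (l : List Int) (a : Int) :
    a ≤ l.foldl (fun k p => if p > k then p else k) a := by
  induction l generalizing a with
  | nil => simp
  | cons h t IH =>
    simp only [List.foldl_cons]
    refine le_trans ?_ (IH (if h > a then h else a))
    split <;> omega

theorem pv_fm_mem (l : List Int) (a p : Int) (hp : p ∈ l) :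
    p ≤ l.foldl (fun k p => if p > k then p else k) a := by
  induction l generalizing a with
  | nil => simp at hp
  | cons h t IH =>
    simp only [List.foldl_cons]
    rcases List.mem_cons.mp hp with h1 | h1
    · subst h1
      refine le_trans ?_ (pv_fm_init t _)
      split <;> omega
    · exact IH _ h1

theorem pv_fm_le (l : List Int) (a c : Int) (ha : a ≤ c) (h : ∀ p ∈ l, p ≤ c) :
    l.foldl (fun k p => if p > k then p else k) a ≤ c := by
  induction l generalizing a with
  | nil => simpa
  | cons hd t IH =>
    simp only [List.foldl_cons]
    have hstep : (if hd > a then hd else a) ≤ c := by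
      have := h hd (List.mem_cons_self ..)
      split <;> omega
    apply IH
    all_goals first
      | exact hstep
      | exact fun p hp => h p (List.mem_cons_of_mem _ hp)

theorem pv_fm_cases (l : List Int) (a : Int) :
    l.foldl (fun k p => if p > k then p else k) a = a ∨
      l.foldl (fun k p => if p > k then p else k) a ∈ l := by
  induction l generalizing a with
  | nil => simp
  | cons h t IH =>
    simp only [List.foldl_cons]
    by_cases hc : h > a
    · rw [if_pos hc]
      rcases IH h with h1 | h1
      · right; simp [h1]
      · right; exact List.mem_cons_of_mem _ h1
    · rw [if_neg hc]
      rcases IH a with h1 | h1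
      · left; exact h1
      · right; exact List.mem_cons_of_mem _ h1

-- ---- OR over the segment nums[j .. j+l-1] ----
def pvOrR (nums : List Int) (j : Nat) : Nat → Int
  | 0 => 0
  | l+1 => PySem.Int.bor (pvOrR nums j l) (nums.getD (j+l) 0)

theorem pv_testBit_orR (nums : List Int) (j l b : Nat) :
    (pvOrR nums j l).testBit b = true ↔ ∃ t, t < l ∧ (nums.getD (j+t) 0).testBit b = true := by
  induction l with
  | zero => simp [pvOrR, pv_testBit_zero_int]
  | succ l IH =>
    rw [pvOrR, pv_testBit_bor, Bool.or_eq_true, IH]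
    constructor
    · rintro (⟨t, ht, hb⟩ | hb)
      · exact ⟨t, by omega, hb⟩
      · exact ⟨l, by omega, hb⟩
    · rintro ⟨t, ht, hb⟩
      by_cases hl : t = l
      · subst hl; right; exact hb
      · left; exact ⟨t, by omega, hb⟩

theorem pv_orR_one (nums : List Int) (j : Nat) : pvOrR nums j 1 = nums.getD j 0 := by
  apply pv_intExt
  intro b
  show (pvOrR nums j (0+1)).testBit b = _
  rw [pvOrR, pvOrR, pv_testBit_bor, pv_testBit_zero_int]
  simp

-- ---- least k with OR(nums[j..k]) = OR(nums[j..j+d]), computed A-style ----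
def pvLk (nums : List Int) (j : Nat) : Nat → Nat
  | 0 => j
  | d+1 =>
    if PySem.Int.bor (pvOrR nums j (d+1)) (nums.getD (j+d+1) 0) = pvOrR nums j (d+1)
    then pvLk nums j d else j+d+1

theorem pv_lk_bounds (nums : List Int) (j d : Nat) : j ≤ pvLk nums j d ∧ pvLk nums j d ≤ j + d := by
  induction d with
  | zero => simp [pvLk]
  | succ d IH =>
    rw [pvLk]
    split
    · omega
    · omega

theorem pv_lk_or (nums : List Int) (j d : Nat) :
    pvOrR nums j (pvLk nums j d - j + 1) = pvOrR nums j (d+1) := by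
  induction d with
  | zero => simp [pvLk]
  | succ d IH =>
    rw [pvLk]
    split
    · rename_i hc
      rw [IH]
      conv_rhs => rw [pvOrR]
      rw [show j + (d+1) = j+d+1 from by omega, hc]
    · have hb := pv_lk_bounds nums j d
      rw [show j+d+1 - j + 1 = (d+1)+1 from by omega]

theorem pv_lk_least (nums : List Int) (j d k : Nat) (hjk : j ≤ k) (hk : k ≤ j + d)
    (h : pvOrR nums j (k-j+1) = pvOrR nums j (d+1)) : pvLk nums j d ≤ k := by
  induction d with
  | zero => simp [pvLk]; omega
  | succ d IH =>
    rw [pvLk]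
    split
    · rename_i hc
      by_cases hkd : k = j + (d+1)
      · have := pv_lk_bounds nums j d
        omega
      · refine IH (by omega) ?_
        rw [h]
        show pvOrR nums j ((d+1)+1) = _
        rw [pvOrR, show j + (d+1) = j+d+1 from by omega, hc]
    · rename_i hc
      by_cases hkd : k = j + (d+1)
      · omega
      · exfalso
        apply hc
        rw [pv_bor_eq_iff]
        intro b hb
        have h1 : (pvOrR nums j (k-j+1)).testBit b = true := by
          rw [h, pv_testBit_orR]
          exact ⟨d+1, by omega, by rw [show j + (d+1) = j + d + 1 from by omega]; exact hb⟩
        rw [pv_testBit_orR] at h1 ⊢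
        obtain ⟨t, ht, hbt⟩ := h1
        exact ⟨t, by omega, hbt⟩

-- ---- A-side invariant entries ----
def pvEntN (nums : List Int) (m j : Nat) : Int := pvOrR nums j (max (j+1) m - j)
def pvEntA (nums : List Int) (m j : Nat) : Int := (pvLk nums j (max (j+1) m - j - 1) : Int) - (j : Int) + 1

theorem pv_inner (nums : List Int) (i : Nat) (hi : i < nums.length) :
    ∀ t, t ≤ i →
    pA_inner (nums.getD i 0) i t
      ((List.range nums.length).map (fun j => if j < t then pvEntN nums i j else pvEntN nums (i+1) j),
       (List.range nums.length).map (fun j => if j < t then pvEntA nums i j else pvEntA nums (i+1) j))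
    = ((List.range nums.length).map (pvEntN nums (i+1)),
       (List.range nums.length).map (pvEntA nums (i+1))) := by
  intro t
  induction t with
  | zero =>
    intro _
    show (_, _) = (_, _)
    simp
  | succ t IH =>
    intro ht
    have hnt : t < nums.length := by omega
    have hENt : pvEntN nums i t = pvOrR nums t (i - t) := by
      unfold pvEntN
      rw [show max (t+1) i = i from by omega]
    -- the common absorption fact used in the "already stable" branch
    have hSubJ : PySem.Int.bor (pvOrR nums t (i-t)) (nums.getD i 0) = pvOrR nums t (i-t) →
        ∀ j, j ≤ t → PySem.Int.bor (pvOrR nums j (i-j)) (nums.getD i 0) = pvOrR nums j (i-j) := by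
      intro hC j hjt
      rw [pv_bor_eq_iff] at hC ⊢
      intro b hb
      have h1 := hC b hb
      rw [pv_testBit_orR] at h1 ⊢
      obtain ⟨t', ht', hbt'⟩ := h1
      exact ⟨t - j + t', by omega, by rw [show j + (t - j + t') = t + t' from by omega]; exact hbt'⟩
    simp only [pA_inner]
    rw [pv_getD_map_range nums.length t _ hnt]
    rw [if_pos (by omega : t < t + 1), hENt]
    by_cases hC : PySem.Int.bor (pvOrR nums t (i-t)) (nums.getD i 0) = pvOrR nums t (i-t)
    · rw [if_pos hC]
      have hAbs := hSubJ hC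
      rw [Prod.mk.injEq]
      constructor
      · refine List.map_congr_left (fun j hj => ?_)
        by_cases hjt : j < t + 1
        · rw [if_pos hjt]
          have hj1 : max (j+1) i = i := by omega
          have hj2 : max (j+1) (i+1) = i+1 := by omega
          unfold pvEntN
          rw [hj1, hj2, show i + 1 - j = (i - j) + 1 from by omega, pvOrR,
            show j + (i - j) = i from by omega]
          exact (hAbs j (by omega)).symm
        · rw [if_neg hjt]
      · refine List.map_congr_left (fun j hj => ?_)
        by_cases hjt : j < t + 1
        · rw [if_pos hjt]
          have hj1 : max (j+1) i = i := by omega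
          have hj2 : max (j+1) (i+1) = i+1 := by omega
          unfold pvEntA
          rw [hj1, hj2]
          have hlk : pvLk nums j (i + 1 - j - 1) = pvLk nums j (i - j - 1) := by
            rw [show i + 1 - j - 1 = (i - j - 1) + 1 from by omega, pvLk,
              if_pos (by
                rw [show i - j - 1 + 1 = i - j from by omega,
                  show j + (i - j - 1) + 1 = i from by omega]
                exact hAbs j (by omega))]
          rw [hlk]
        · rw [if_neg hjt]
    · rw [if_neg hC]
      have hNS : (((List.range nums.length).map (fun j => if j < t + 1 then pvEntN nums i j else pvEntN nums (i+1) j)).set t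
          (PySem.Int.bor (pvOrR nums t (i-t)) (nums.getD i 0)))
          = (List.range nums.length).map (fun j => if j < t then pvEntN nums i j else pvEntN nums (i+1) j) := by
        rw [pv_set_map_range]
        refine List.map_congr_left (fun j hj => ?_)
        by_cases hjt : j = t
        · subst hjt
          rw [if_pos rfl, if_neg (by omega : ¬ j < j)]
          unfold pvEntN
          rw [show max (j+1) (i+1) = i+1 from by omega,
            show i + 1 - j = (i - j) + 1 from by omega, pvOrR,
            show j + (i - j) = i from by omega]
        · rw [if_neg hjt]
          by_cases h1 : j < t
          · rw [if_pos h1, if_pos (by omega)]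
          · rw [if_neg h1, if_neg (by omega)]
      have hANS : (((List.range nums.length).map (fun j => if j < t + 1 then pvEntA nums i j else pvEntA nums (i+1) j)).set t
          ((i : Int) - (t : Nat) + 1))
          = (List.range nums.length).map (fun j => if j < t then pvEntA nums i j else pvEntA nums (i+1) j) := by
        rw [pv_set_map_range]
        refine List.map_congr_left (fun j hj => ?_)
        by_cases hjt : j = t
        · subst hjt
          rw [if_pos rfl, if_neg (by omega : ¬ j < j)]
          unfold pvEntA
          rw [show max (j+1) (i+1) = i+1 from by omega]
          rw [show i + 1 - j - 1 = (i - j - 1) + 1 from by omega, pvLk,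
            if_neg (by
              rw [show i - j - 1 + 1 = i - j from by omega,
                show j + (i - j - 1) + 1 = i from by omega]
              exact hC)]
          rw [show j + (i - j - 1) + 1 = i from by omega]
        · rw [if_neg hjt]
          by_cases h1 : j < t
          · rw [if_pos h1, if_pos (by omega)]
          · rw [if_neg h1, if_neg (by omega)]
      rw [hNS, hANS]
      exact IH (by omega)

theorem pv_outer (nums : List Int) (m : Nat) (hm : m ≤ nums.length) :
    (List.range m).foldl (fun st i => pA_inner (st.1.getD i 0) i i st)
      ((List.range nums.length).map (pvEntN nums 0), (List.range nums.length).map (pvEntA nums 0))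
    = ((List.range nums.length).map (pvEntN nums m), (List.range nums.length).map (pvEntA nums m)) := by
  induction m with
  | zero => rfl
  | succ m IH =>
    have hr : List.range (m+1) = List.range m ++ [m] := List.range_succ
    rw [hr, List.foldl_append, IH (by omega)]
    simp only [List.foldl_cons, List.foldl_nil]
    have hget : ((List.range nums.length).map (pvEntN nums m)).getD m 0 = pvEntN nums m m :=
      pv_getD_map_range nums.length m _ (by omega)
    have hvm : pvEntN nums m m = nums.getD m 0 := by
      unfold pvEntN
      rw [show max (m+1) m - m = 1 from by omega, pv_orR_one]
    have hmixN : (List.range nums.length).map (pvEntN nums m)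
        = (List.range nums.length).map (fun j => if j < m then pvEntN nums m j else pvEntN nums (m+1) j) := by
      refine List.map_congr_left (fun j hj => ?_)
      by_cases h1 : j < m
      · rw [if_pos h1]
      · rw [if_neg h1]
        unfold pvEntN
        rw [show max (j+1) m = max (j+1) (m+1) from by omega]
    have hmixA : (List.range nums.length).map (pvEntA nums m)
        = (List.range nums.length).map (fun j => if j < m then pvEntA nums m j else pvEntA nums (m+1) j) := by
      refine List.map_congr_left (fun j hj => ?_)
      by_cases h1 : j < m
      · rw [if_pos h1]
      · rw [if_neg h1]
        unfold pvEntA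
        rw [show max (j+1) m = max (j+1) (m+1) from by omega]
    show pA_inner (((List.range nums.length).map (pvEntN nums m)).getD m 0) m m
      ((List.range nums.length).map (pvEntN nums m), (List.range nums.length).map (pvEntA nums m)) = _
    rw [hget, hvm, hmixN, hmixA]
    exact pv_inner nums m (by omega) m le_rfl

theorem pv_A_result (nums : List Int) :
    smallestSubarrays3 nums = (List.range nums.length).map (pvEntA nums nums.length) := by
  unfold smallestSubarrays3
  have hN0 : nums = (List.range nums.length).map (pvEntN nums 0) := by
    apply List.ext_getElem
    · simp
    · intro k h1 h2
      simp only [List.getElem_map, List.getElem_range]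
      unfold pvEntN
      rw [show max (k+1) 0 - k = 1 from by omega, pv_orR_one,
        List.getD_eq_getElem?_getD, List.getElem?_eq_getElem h1]
      rfl
  have hA0 : List.replicate nums.length (1 : Int) = (List.range nums.length).map (pvEntA nums 0) := by
    apply List.ext_getElem
    · simp
    · intro k h1 h2
      simp only [List.getElem_replicate, List.getElem_map, List.getElem_range]
      unfold pvEntA
      rw [show max (k+1) 0 - k - 1 = 0 from by omega]
      show (1 : Int) = (pvLk nums k 0 : Int) - (k : Int) + 1
      rw [pvLk]
      omega
  have hpair : (nums, List.replicate nums.length (1 : Int))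
      = ((List.range nums.length).map (pvEntN nums 0), (List.range nums.length).map (pvEntA nums 0)) := by
    rw [Prod.mk.injEq]
    exact ⟨hN0, hA0⟩
  conv_lhs => rw [hpair]
  rw [pv_outer nums nums.length le_rfl]

-- ---- B-side: nearest index ≥ i whose value has bit b, else -1 ----
def pvLastF (nums : List Int) (b : Nat) : Nat → Nat → Int
  | 0, _ => -1
  | c+1, i => if (nums.getD i 0).testBit b then (i : Int) else pvLastF nums b c (i+1)

def pvLast (nums : List Int) (b i : Nat) : Int := pvLastF nums b (nums.length - i) i

theorem pv_lastF_spec (nums : List Int) (b : Nat) :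
    ∀ c i, (pvLastF nums b c i = -1 ∧ ∀ t, i ≤ t → t < i + c → (nums.getD t 0).testBit b = false) ∨
      (∃ t : Nat, pvLastF nums b c i = (t : Int) ∧ i ≤ t ∧ t < i + c ∧ (nums.getD t 0).testBit b = true ∧
        ∀ s, i ≤ s → s < t → (nums.getD s 0).testBit b = false) := by
  intro c
  induction c with
  | zero => intro i; left; exact ⟨rfl, fun t h1 h2 => by omega⟩
  | succ c IH =>
    intro i
    rw [pvLastF]
    by_cases hb : (nums.getD i 0).testBit b = true
    · right
      exact ⟨i, by rw [if_pos hb], le_refl i, by omega, hb, fun s h1 h2 => by omega⟩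
    · rw [if_neg hb]
      rcases IH (i+1) with ⟨h1, h2⟩ | ⟨t, h1, h2, h3, h4, h5⟩
      · left
        refine ⟨h1, fun t ht1 ht2 => ?_⟩
        by_cases hti : t = i
        · subst hti; simpa using hb
        · exact h2 t (by omega) (by omega)
      · right
        refine ⟨t, h1, by omega, by omega, h4, fun s hs1 hs2 => ?_⟩
        by_cases hsi : s = i
        · subst hsi; simpa using hb
        · exact h5 s (by omega) hs2

theorem pv_foldSet (c N : Nat) (hcN : c ≤ N) (P : Nat → Prop) [DecidablePred P] (v : Nat → Int) (f : Nat → Int) :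
    (List.range c).foldl (fun l b => if P b then l.set b (v b) else l) ((List.range N).map f)
      = (List.range N).map (fun b => if b < c ∧ P b then v b else f b) := by
  induction c with
  | zero => simp
  | succ c IH =>
    rw [List.range_succ, List.foldl_append, IH (by omega)]
    simp only [List.foldl_cons, List.foldl_nil]
    by_cases hP : P c
    · rw [if_pos hP, pv_set_map_range]
      refine List.map_congr_left (fun b hb => ?_)
      rw [List.mem_range] at hb
      by_cases hbc : b = c
      · subst hbc; simp [hP]
      · simp only [if_neg hbc]
        by_cases h1 : b < c
        · have h2 : b < c + 1 := by omega
          simp [h1, h2]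
        · have h2 : ¬ (b < c + 1) := by omega
          simp [h1, h2]
    · rw [if_neg hP]
      refine List.map_congr_left (fun b hb => ?_)
      by_cases hbc : b = c
      · subst hbc
        simp [hP]
      · by_cases h1 : b < c
        · have h2 : b < c + 1 := by omega
          simp [h1, h2]
        · have h2 : ¬ (b < c + 1) := by omega
          simp [h1, h2]

theorem pv_last_step (nums : List Int) (b i : Nat) (hi : i < nums.length) :
    pvLast nums b i = if (nums.getD i 0).testBit b then (i : Int) else pvLast nums b (i+1) := by
  show pvLastF nums b (nums.length - i) i = _
  rw [show nums.length - i = (nums.length - (i+1)) + 1 from by omega, pvLastF]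
  rfl

theorem pv_setBits_step (nums : List Int) (i : Nat) (hi : i < nums.length) :
    pB_setBits (nums.getD i 0) i ((List.range 33).map (fun b => pvLast nums b (i+1)))
      = (List.range 33).map (fun b => pvLast nums b i) := by
  unfold pB_setBits
  rw [pv_foldSet 33 33 le_rfl _ _ _]
  refine List.map_congr_left (fun b hb => ?_)
  rw [List.mem_range] at hb
  rw [pv_last_step nums b i hi]
  by_cases hbit : (nums.getD i 0).testBit b = true
  · rw [if_pos ⟨hb, (pv_bitSel _ _).mpr hbit⟩, if_pos hbit]
  · rw [if_neg (fun hh => hbit ((pv_bitSel _ _).mp hh.2)), if_neg hbit]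

theorem pv_B_loop (nums : List Int) :
    ∀ i, i ≤ nums.length → ∀ acc,
    pB_loop nums i ((List.range 33).map (fun b => pvLast nums b i)) acc
      = ((List.range i).map (fun j => pB_maxOf j ((List.range 33).map (fun b => pvLast nums b j)) - (j : Int) + 1)) ++ acc := by
  intro i
  induction i with
  | zero => intro _ acc; simp [pB_loop]
  | succ i IH =>
    intro hi acc
    rw [pB_loop]
    simp only [pv_setBits_step nums i (by omega)]
    rw [IH (by omega)]
    have hr : List.range (i+1) = List.range i ++ [i] := List.range_succ
    rw [hr, List.map_append, List.append_assoc]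
    rfl

theorem pv_B_result (nums : List Int) :
    smallestSubarrays3_alt nums
      = (List.range nums.length).map
          (fun j => pB_maxOf j ((List.range 33).map (fun b => pvLast nums b j)) - (j : Int) + 1) := by
  unfold smallestSubarrays3_alt
  have h0 : List.replicate 33 (-1 : Int) = (List.range 33).map (fun b => pvLast nums b nums.length) := by
    apply List.ext_getElem
    · simp
    · intro k h1 h2
      simp only [List.getElem_replicate, List.getElem_map, List.getElem_range]
      show (-1 : Int) = pvLastF nums k (nums.length - nums.length) nums.length
      rw [Nat.sub_self]
      rfl
  rw [h0, pv_B_loop nums nums.length le_rfl, List.append_nil]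

-- ---- glue ----
theorem pv_dom_g (nums : List Int) (hD : Dom_smallestSubarrays3 nums) (t : Nat) (ht : t < nums.length) :
    pvDomInt (nums.getD t 0) = true := by
  rw [List.getD_eq_getElem?_getD, List.getElem?_eq_getElem ht]
  exact List.all_eq_true.mp hD _ (List.getElem_mem ht)

theorem pv_glue (nums : List Int) (hD : Dom_smallestSubarrays3 nums) (j : Nat) (hj : j < nums.length) :
    pB_maxOf j ((List.range 33).map (fun b => pvLast nums b j)) = (pvLk nums j (nums.length - j - 1) : Int) := by
  have hb0 : ∀ x : Int, pvDomInt x = true → ∀ b' : Nat, x.testBit b' = x.testBit (min b' 32) := by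
    intro x hx b'
    by_cases h33 : b' < 33
    · rw [show min b' 32 = b' from by omega]
    · rw [show min b' 32 = 32 from by omega]
      exact pv_dom_testBit_high x hx b' (by omega)
  have hlkb := pv_lk_bounds nums j (nums.length - j - 1)
  unfold pB_maxOf
  apply le_antisymm
  · -- every tracked position is at most the least stabilising index
    apply pv_fm_le
    · exact_mod_cast hlkb.1
    · intro p hp
      rw [List.mem_map] at hp
      obtain ⟨b, _, hpb⟩ := hp
      rcases pv_lastF_spec nums b (nums.length - j) j with ⟨h1, _⟩ | ⟨t, h1, h2, h3, h4, h5⟩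
      · rw [← hpb]
        show pvLastF nums b (nums.length - j) j ≤ _
        rw [h1]
        have : (0 : Int) ≤ (pvLk nums j (nums.length - j - 1) : Int) := Int.natCast_nonneg _
        omega
      · rw [← hpb]
        show pvLastF nums b (nums.length - j) j ≤ _
        rw [h1]
        have hbit : (pvOrR nums j (nums.length - j - 1 + 1)).testBit b = true := by
          rw [pv_testBit_orR]
          exact ⟨t - j, by omega, by rw [show j + (t - j) = t from by omega]; exact h4⟩
        rw [← pv_lk_or, pv_testBit_orR] at hbit
        obtain ⟨t', ht', hbt'⟩ := hbit
        have hmin : t ≤ j + t' := by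
          by_contra hlt
          rw [h5 (j + t') (by omega) (by omega)] at hbt'
          exact absurd hbt' (by simp)
        have h6 : j + t' ≤ pvLk nums j (nums.length - j - 1) := by omega
        exact_mod_cast le_trans (by exact_mod_cast hmin) (by exact_mod_cast h6)
  · -- the least stabilising index is at most the fold maximum
    have hKi := pv_fm_init ((List.range 33).map (fun b => pvLast nums b j)) ((j : Nat) : Int)
    have hK : ∃ k : Nat,
        ((List.range 33).map (fun b => pvLast nums b j)).foldl (fun k p => if p > k then p else k) ((j : Nat) : Int) = (k : Int)
          ∧ j ≤ k ∧ k < nums.length := by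
      rcases pv_fm_cases ((List.range 33).map (fun b => pvLast nums b j)) ((j : Nat) : Int) with hc | hc
      · exact ⟨j, hc, le_refl j, hj⟩
      · rw [List.mem_map] at hc
        obtain ⟨b, _, hpb⟩ := hc
        rcases pv_lastF_spec nums b (nums.length - j) j with ⟨h1, _⟩ | ⟨t, h1, h2, h3, h4, _⟩
        · exfalso
          have h1' : pvLast nums b j = -1 := h1
          rw [h1'] at hpb
          omega
        · have h1' : pvLast nums b j = (t : Int) := h1
          rw [h1'] at hpb
          refine ⟨t, hpb.symm, ?_, by omega⟩
          rw [hpb.symm] at hKi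
          exact_mod_cast hKi
    obtain ⟨k, hKk, hjk, hkn⟩ := hK
    rw [hKk]
    have hleast : pvLk nums j (nums.length - j - 1) ≤ k := by
      apply pv_lk_least nums j _ k hjk (by omega)
      apply pv_intExt
      intro b'
      have hiff : ((pvOrR nums j (k - j + 1)).testBit b' = true) ↔ ((pvOrR nums j (nums.length - j - 1 + 1)).testBit b' = true) := by
        constructor
        · rw [pv_testBit_orR, pv_testBit_orR]
          rintro ⟨t', ht', hbt'⟩
          exact ⟨t', by omega, hbt'⟩
        · rw [pv_testBit_orR, pv_testBit_orR]
          rintro ⟨t, ht, hbt⟩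
          have hdomt : pvDomInt (nums.getD (j + t) 0) = true := pv_dom_g nums hD (j + t) (by omega)
          have hb0t : (nums.getD (j + t) 0).testBit (min b' 32) = true := by
            rw [← hb0 _ hdomt b']
            exact hbt
          rcases pv_lastF_spec nums (min b' 32) (nums.length - j) j with ⟨_, h2⟩ | ⟨t0, h1, h2, h3, h4, _⟩
          · exfalso
            rw [h2 (j + t) (by omega) (by omega)] at hb0t
            exact absurd hb0t (by simp)
          · have hmem : pvLast nums (min b' 32) j ∈ (List.range 33).map (fun b => pvLast nums b j) :=
              List.mem_map.mpr ⟨min b' 32, List.mem_range.mpr (by omega), rfl⟩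
            have hle := pv_fm_mem _ (((j : Nat)) : Int) _ hmem
            rw [hKk] at hle
            have ht0 : pvLast nums (min b' 32) j = (t0 : Int) := h1
            rw [ht0] at hle
            have ht0k : t0 ≤ k := by exact_mod_cast hle
            have hdomt0 : pvDomInt (nums.getD t0 0) = true := pv_dom_g nums hD t0 (by omega)
            refine ⟨t0 - j, by omega, ?_⟩
            rw [show j + (t0 - j) = t0 from by omega, hb0 _ hdomt0 b']
            exact h4
      cases hLHS : (pvOrR nums j (k - j + 1)).testBit b' with
      | true => exact (hiff.mp hLHS).symm
      | false =>
        cases hRHS : (pvOrR nums j (nums.length - j - 1 + 1)).testBit b' with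
        | true =>
          have hcontr := hiff.mpr hRHS
          rw [hLHS] at hcontr
          exact hcontr
        | false => rfl
    exact_mod_cast hleast

-- ===== VERDICT (by name: the statement is the Claim_ definition above) =====
theorem smallestSubarrays3_spec : Claim_equal_smallestSubarrays3 := by
  intro nums hD
  unfold Spec_smallestSubarrays3
  rw [pv_A_result, pv_B_result]
  refine List.map_congr_left (fun j hj => ?_)
  rw [List.mem_range] at hj
  rw [pv_glue nums hD j hj]
  have h1 : max (j+1) nums.length = nums.length := by omega
  unfold pvEntA
  rw [h1]
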